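-- pv_equiv track=rewrite | github.com/rrodrig30/vaucda | backend/app/services/note_processing/extractors/social_extractor.py | _filter_healthcare_maintenance
-- ===== SOURCE A (Python) =====
-- def _filter_healthcare_maintenance(text: str) -> str:
--     """
--     Filter out healthcare maintenance content (vaccines, screenings, etc.)
--     from social history text.
--
--     Stops extraction when healthcare maintenance markers are found.
--     """
--     # Stop at healthcare maintenance section markers
--     healthcare_markers = [
--         'Healthcare-',
--         'Healthcare:',
--         'Health maintenance:',
--         'Living will',
--         'Advance directive',
--         'Shingles-',
--         'Flu shot',
--         'Covid',
--         'Pvx 20',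
--         'RSV vaccine',
--         'HIV-declines',
--         'Hepatitis C',
--         'Colonoscopy',
--         'Ultrasound',
--         'Sleep study',
--         "Alzheimer's work-up",
--         'Mammogram',
--         'Pap smear'
--     ]
--
--     lines = text.split('\n')
--     filtered_lines = []
--
--     for line in lines:
--         # Check if line contains healthcare maintenance content
--         is_healthcare = False
--         for marker in healthcare_markers:
--             if marker.lower() in line.lower():
--                 is_healthcare = True
--                 break
--
--         if is_healthcare:
--             # Stop processing - don't include this line or anything after
--             break
--
--         # Also skip lines that are just structural artifacts
--         if line.strip() and not line.strip() in ['Behavior - Cooperative', 'Psychological Social:']: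
--             filtered_lines.append(line)
--
--     return '\n'.join(filtered_lines).strip()
-- ===== SOURCE B (Python) =====
-- _HEALTHCARE_MARKERS = [
--     'Healthcare-', 'Healthcare:', 'Health maintenance:', 'Living will',
--     'Advance directive', 'Shingles-', 'Flu shot', 'Covid', 'Pvx 20',
--     'RSV vaccine', 'HIV-declines', 'Hepatitis C', 'Colonoscopy',
--     'Ultrasound', 'Sleep study', "Alzheimer's work-up", 'Mammogram',
--     'Pap smear'
-- ]
--
-- _ARTIFACTS = ('Behavior - Cooperative', 'Psychological Social:')
--
--
-- def _filter_healthcare_maintenance(text: str) -> str: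
--     # One global substring search: the character position of the EARLIEST
--     # case-insensitive marker occurrence anywhere in the text (len(text) if none).
--     low = text.lower()
--     cut = len(text)
--     for m in _HEALTHCARE_MARKERS:
--         p = low.find(m.lower())
--         if p != -1 and p < cut:
--             cut = p
--     # Keep lines purely by character offset: a line survives iff it ends
--     # strictly before the cut position (no per-line marker test needed,
--     # since a marker never spans a newline).
--     kept = []
--     pos = 0
--     for line in text.split('\n'):
--         end = pos + len(line)
--         if end > cut:
--             break
--         s = line.strip()
--         if s and s not in _ARTIFACTS:
--             kept.append(line)
--         pos = end + 1
--     return '\n'.join(kept).strip()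
-- ===== Notes on version B (the rewrite author's own statement) =====
-- stated objective: alternative
-- what changed: Instead of A's per-line loop that tests every marker against each line and breaks, B performs one global case-insensitive substring search over the whole text to find the earliest marker occurrence, then keeps lines purely by character offset against that cut position.
import Mathlib
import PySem

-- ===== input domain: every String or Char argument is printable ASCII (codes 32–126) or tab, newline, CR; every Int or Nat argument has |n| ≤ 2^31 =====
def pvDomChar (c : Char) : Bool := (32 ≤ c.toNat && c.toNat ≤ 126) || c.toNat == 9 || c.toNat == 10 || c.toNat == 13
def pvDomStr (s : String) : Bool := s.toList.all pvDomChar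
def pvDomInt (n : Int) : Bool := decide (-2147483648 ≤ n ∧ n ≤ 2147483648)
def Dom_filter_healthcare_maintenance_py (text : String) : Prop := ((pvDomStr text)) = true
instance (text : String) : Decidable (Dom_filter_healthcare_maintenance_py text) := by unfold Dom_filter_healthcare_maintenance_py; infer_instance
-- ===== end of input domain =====

-- B replaces A's per-line marker scan with ONE global case-insensitive search of the whole
-- text for the earliest marker occurrence, then keeps lines purely by character offset
-- against that cut position (objective: alternative).

-- shared constant data: the marker list and the artifact strings (pure data, used by both ports)
def pvHealthcareMarkers : List String :=
  ["Healthcare-", "Healthcare:", "Health maintenance:", "Living will",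
   "Advance directive", "Shingles-", "Flu shot", "Covid", "Pvx 20",
   "RSV vaccine", "HIV-declines", "Hepatitis C", "Colonoscopy",
   "Ultrasound", "Sleep study", "Alzheimer's work-up", "Mammogram",
   "Pap smear"]

def pvArtifacts : List String := ["Behavior - Cooperative", "Psychological Social:"]

-- ===== PORT A =====
-- A's inner for-marker loop with break setting a flag = List.any over the markers
def pvIsHealthcareA (line : String) : Bool :=
  pvHealthcareMarkers.any (fun m => PySem.Str.isIn (PySem.Str.lower m) (PySem.Str.lower line))

-- A's main loop: accumulator of filtered lines, break on a healthcare line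
def pvLoopA (acc : List String) : List String → List String
  | [] => acc
  | line :: rest =>
    if pvIsHealthcareA line then acc
    else if PySem.Str.strip line != "" && !(pvArtifacts.contains (PySem.Str.strip line)) then
      pvLoopA (acc ++ [line]) rest
    else pvLoopA acc rest

-- text.split('\n'): sep is the nonempty literal "\n", so split? is always some
def filter_healthcare_maintenance_py (text : String) : String :=
  let lines := (PySem.Str.split? text "\n").getD []
  PySem.Str.strip (PySem.Str.join "\n" (pvLoopA [] lines))

-- ===== PORT B =====
-- Source B's line filter: non-blank after strip and not a structural artifact
def pvKeepB (line : String) : Bool :=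
  PySem.Str.strip line != "" && !(pvArtifacts.contains (PySem.Str.strip line))

-- Source B's second loop: keep lines by character offset, stop once a line ends past the cut
def pvLoopB (cut : Int) : Int → List String → List String
  | _, [] => []
  | pos, line :: rest =>
    let e := pos + PySem.Str.len line
    if e > cut then []
    else (if pvKeepB line then [line] else []) ++ pvLoopB cut (e + 1) rest

def filter_healthcare_maintenance_py_alt (text : String) : String :=
  let low := PySem.Str.lower text
  let cut := pvHealthcareMarkers.foldl (fun cut m =>
      let p := PySem.Str.find low (PySem.Str.lower m)
      if p ≠ -1 ∧ p < cut then p else cut) (PySem.Str.len text)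
  let kept := pvLoopB cut 0 ((PySem.Str.split? text "\n").getD [])
  PySem.Str.strip (PySem.Str.join "\n" kept)

-- ===== PRECONDITION & SPEC =====
def Spec_filter_healthcare_maintenance_py (text : String) (out : String) : Prop := out = filter_healthcare_maintenance_py_alt text
instance (text : String) (out : String) : Decidable (Spec_filter_healthcare_maintenance_py text out) := by unfold Spec_filter_healthcare_maintenance_py; infer_instance

-- ===== CLAIM (what is proved, stated in full; the proofs are below) =====
def Claim_equal_filter_healthcare_maintenance_py : Prop := ∀ (text : String), Dom_filter_healthcare_maintenance_py text → Spec_filter_healthcare_maintenance_py text (filter_healthcare_maintenance_py text)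

-- ===== LEMMAS AND PROOFS =====

-- ---- proof-side vocabulary ----

-- lowered marker
def pvLowM (m : String) : List Char := PySem.Chars.lower m.toList

-- "some marker occurs (case-insensitively) in l"
def pvHasMarker (l : List Char) : Bool :=
  pvHealthcareMarkers.any (fun m => PySem.Chars.isIn (pvLowM m) (PySem.Chars.lower l))

-- "some marker occurrence starts at position j of (lower cs)"
def pvP (cs : List Char) (j : Nat) : Prop :=
  ∃ m ∈ pvHealthcareMarkers, pvLowM m <+: (PySem.Chars.lower cs).drop j

-- char-level cut: earliest marker occurrence position, or length
def pvCutC (cs : List Char) : Int :=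
  pvHealthcareMarkers.foldl (fun cut m =>
    let p := PySem.Chars.find (PySem.Chars.lower cs) (PySem.Chars.lower m.toList)
    if p ≠ -1 ∧ p < cut then p else cut) (cs.length : Int)

-- structural model of text.split('\n')
def pvSplitNL (pre : List Char) : List Char → List (List Char)
  | [] => [pre]
  | c :: rest => if c = '\n' then pre :: pvSplitNL [] rest else pvSplitNL (pre ++ [c]) rest

theorem pvMarkers_facts : ∀ m ∈ pvHealthcareMarkers, pvLowM m ≠ [] ∧ '\n' ∉ pvLowM m := by
  decide

theorem pvLower_append (l rest : List Char) :
    PySem.Chars.lower (l ++ '\n' :: rest) = PySem.Chars.lower l ++ '\n' :: PySem.Chars.lower rest := by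
  have h10 : PySem.Chars.lowerChar '\n' = '\n' := by decide
  simp [PySem.Chars.lower, h10]

-- pvHasMarker l ↔ some occurrence position exists in l
theorem pvHasMarker_iff (l : List Char) : pvHasMarker l = true ↔ ∃ j, pvP l j := by
  unfold pvHasMarker pvP
  rw [List.any_eq_true]
  constructor
  · rintro ⟨m, hm, hin⟩
    obtain ⟨j, hj⟩ := (PySem.Chars.exists_prefix_drop_iff_isIn (pvLowM m) (PySem.Chars.lower l)).mpr hin
    exact ⟨j, m, hm, hj⟩
  · rintro ⟨j, m, hm, hj⟩
    exact ⟨m, hm, (PySem.Chars.exists_prefix_drop_iff_isIn (pvLowM m) (PySem.Chars.lower l)).mp ⟨j, hj⟩⟩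

-- A's fused loop = filter of the takeWhile prefix, modulo the accumulator
theorem pvLoopA_eq (lines : List String) : ∀ (acc : List String),
    pvLoopA acc lines = acc ++ (lines.takeWhile (fun s => !pvIsHealthcareA s)).filter pvKeepB := by
  induction lines with
  | nil => intro acc; simp [pvLoopA]
  | cons line rest ih =>
    intro acc
    by_cases h : pvIsHealthcareA line
    · simp [pvLoopA, h]
    · have hcond : (PySem.Str.strip line != "" && !(pvArtifacts.contains (PySem.Str.strip line))) = pvKeepB line := rfl
      have hb : (!pvIsHealthcareA line) = true := by simp [h]
      rw [List.takeWhile_cons, hb]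
      simp only [pvLoopA, if_neg h, hcond, if_true]
      cases hk : pvKeepB line
      · simp [ih, hk]
      · simp [ih, hk]

-- splitOn bridge
theorem pvGo_eq (fuel : Nat) : ∀ (l cur : List Char) (acc : List (List Char)), l.length < fuel →
    PySem.Chars.splitOn.go ['\n'] fuel l cur acc = acc.reverse ++ pvSplitNL cur.reverse l := by
  induction fuel with
  | zero => intro l cur acc h; omega
  | succ f ih =>
    intro l cur acc h
    match l with
    | [] => simp [PySem.Chars.splitOn.go, pvSplitNL]
    | c :: rest =>
      by_cases hc : c = '\n'
      · subst hc
        have hpre : ['\n'].isPrefixOf ('\n' :: rest) = true := by simp [List.isPrefixOf]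
        rw [PySem.Chars.splitOn.go]
        simp only [hpre, if_pos, List.length_cons, List.drop_succ_cons, List.drop_zero, List.length_nil]
        rw [ih rest [] (cur.reverse :: acc) (by simpa using Nat.lt_of_succ_lt_succ h)]
        simp [pvSplitNL]
      · have hpre : ['\n'].isPrefixOf (c :: rest) = false := by
          simp [List.isPrefixOf]; exact fun hh => absurd hh.symm hc
        rw [PySem.Chars.splitOn.go]
        simp only [hpre]
        rw [ih rest (c :: cur) acc (by simpa using Nat.lt_of_succ_lt_succ h)]
        simp [pvSplitNL, hc]

theorem pvSplitOn_eq (cs : List Char) : PySem.Chars.splitOn cs ['\n'] = pvSplitNL [] cs := by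
  unfold PySem.Chars.splitOn
  rw [pvGo_eq (cs.length + 1) cs [] [] (by omega)]
  simp

theorem pvSplitNL_no_nl {l : List Char} (h : '\n' ∉ l) (pre : List Char) : pvSplitNL pre l = [pre ++ l] := by
  induction l generalizing pre with
  | nil => simp [pvSplitNL]
  | cons c rest ih =>
    have hc : c ≠ '\n' := fun hh => h (hh ▸ List.mem_cons_self ..)
    rw [pvSplitNL, if_neg hc, ih (fun hh => h (List.mem_cons_of_mem _ hh))]
    simp

theorem pvSplitNL_append {l : List Char} (h : '\n' ∉ l) (pre rest : List Char) :
    pvSplitNL pre (l ++ '\n' :: rest) = (pre ++ l) :: pvSplitNL [] rest := by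
  induction l generalizing pre with
  | nil => simp [pvSplitNL]
  | cons c l' ih =>
    have hc : c ≠ '\n' := fun hh => h (hh ▸ List.mem_cons_self ..)
    rw [List.cons_append, pvSplitNL, if_neg hc, ih (fun hh => h (List.mem_cons_of_mem _ hh))]
    simp

-- generic min-fold facts
theorem pvFold_le (f : String → Int) (ms : List String) : ∀ c : Int,
    ms.foldl (fun cut m => if f m ≠ -1 ∧ f m < cut then f m else cut) c ≤ c := by
  induction ms with
  | nil => intro c; simp
  | cons m rest ih =>
    intro c
    simp only [List.foldl_cons]
    split_ifs with hif
    · exact le_trans (ih (f m)) (le_of_lt hif.2)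
    · exact ih c

theorem pvFold_le_f (f : String → Int) (ms : List String) : ∀ c : Int, ∀ m ∈ ms, f m ≠ -1 →
    ms.foldl (fun cut m => if f m ≠ -1 ∧ f m < cut then f m else cut) c ≤ f m := by
  induction ms with
  | nil => simp
  | cons m0 rest ih =>
    intro c m hm hne
    simp only [List.foldl_cons]
    rcases List.mem_cons.mp hm with heq | hmem
    · subst heq
      split_ifs with hif
      · exact pvFold_le f rest (f m)
      · have hge : ¬ (f m < c) := fun hlt => hif ⟨hne, hlt⟩
        exact le_trans (pvFold_le f rest c) (by omega)
    · split_ifs with hif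
      · exact ih (f m0) m hmem hne
      · exact ih c m hmem hne

theorem pvFold_cases (f : String → Int) (ms : List String) : ∀ c : Int,
    ms.foldl (fun cut m => if f m ≠ -1 ∧ f m < cut then f m else cut) c = c ∨
    ∃ m ∈ ms, ms.foldl (fun cut m => if f m ≠ -1 ∧ f m < cut then f m else cut) c = f m ∧ f m ≠ -1 := by
  induction ms with
  | nil => intro c; left; simp
  | cons m0 rest ih =>
    intro c
    simp only [List.foldl_cons]
    split_ifs with hif
    · rcases ih (f m0) with h | ⟨m, hm, h1, h2⟩
      · right; exact ⟨m0, List.mem_cons_self .., h, hif.1⟩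
      · right; exact ⟨m, List.mem_cons_of_mem _ hm, h1, h2⟩
    · rcases ih c with h | ⟨m, hm, h1, h2⟩
      · left; exact h
      · right; exact ⟨m, List.mem_cons_of_mem _ hm, h1, h2⟩

-- characterisation of the cut: either no marker anywhere, or the least occurrence position
theorem pvCutC_spec (cs : List Char) :
    (pvCutC cs = (cs.length : Int) ∧ ∀ j, ¬ pvP cs j) ∨
    (0 ≤ pvCutC cs ∧ pvCutC cs < (cs.length : Int) ∧ pvP cs (pvCutC cs).toNat ∧
      ∀ j < (pvCutC cs).toNat, ¬ pvP cs j) := by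
  have hlen : (PySem.Chars.lower cs).length = cs.length := by simp [PySem.Chars.lower]
  set L := PySem.Chars.lower cs with hL
  set F : String → Int := fun m => PySem.Chars.find L (PySem.Chars.lower m.toList) with hF
  have hr : pvCutC cs = pvHealthcareMarkers.foldl
      (fun cut m => if F m ≠ -1 ∧ F m < cut then F m else cut) (cs.length : Int) := rfl
  have hnonneg : ∀ m, F m ≠ -1 ↔ 0 ≤ F m := by
    intro m
    have h1 := PySem.Chars.neg_one_le_find L (PySem.Chars.lower m.toList)
    simp only [hF]
    constructor <;> intro h <;> omega
  have hex : ∀ m, F m ≠ -1 ↔ ∃ j, pvLowM m <+: L.drop j := by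
    intro m
    rw [hnonneg m, hF]
    rw [PySem.Chars.find_nonneg_iff, ← PySem.Chars.isIn_iff_infix,
      ← PySem.Chars.exists_prefix_drop_iff_isIn]
    rfl
  have hlt : ∀ m ∈ pvHealthcareMarkers, F m ≠ -1 → F m < (cs.length : Int) := by
    intro m hm hne
    have h0 : 0 ≤ F m := (hnonneg m).mp hne
    have hspec := PySem.Chars.find_spec (s := L) (sub := PySem.Chars.lower m.toList) h0
    have hnil : pvLowM m ≠ [] := (pvMarkers_facts m hm).1
    by_contra hge
    have hlen2 : L.length ≤ (F m).toNat := by omega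
    have : L.drop (F m).toNat = [] := List.drop_eq_nil_of_le hlen2
    rw [this] at hspec
    exact hnil (List.prefix_nil.mp hspec.1)
  by_cases hP : ∃ j, pvP cs j
  · obtain ⟨j0, m0, hm0, hpre0⟩ := hP
    have hne0 : F m0 ≠ -1 := (hex m0).mpr ⟨j0, hpre0⟩
    have hle0 : pvCutC cs ≤ F m0 := by rw [hr]; exact pvFold_le_f F pvHealthcareMarkers _ m0 hm0 hne0
    have hlt0 : F m0 < (cs.length : Int) := hlt m0 hm0 hne0
    rcases pvFold_cases F pvHealthcareMarkers (cs.length : Int) with hc | ⟨m1, hm1, he1, hne1⟩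
    · rw [← hr] at hc; omega
    · rw [← hr] at he1
      have h0 : 0 ≤ F m1 := (hnonneg m1).mp hne1
      have hspec1 := PySem.Chars.find_spec (s := L) (sub := PySem.Chars.lower m1.toList) h0
      right
      refine ⟨by omega, by omega, ?_, ?_⟩
      · refine ⟨m1, hm1, ?_⟩
        rw [he1]
        exact hspec1.1
      · intro j hj hPj
        obtain ⟨m2, hm2, hpre2⟩ := hPj
        have hne2 : F m2 ≠ -1 := (hex m2).mpr ⟨j, hpre2⟩
        have h02 : 0 ≤ F m2 := (hnonneg m2).mp hne2
        have hspec2 := PySem.Chars.find_spec (s := L) (sub := PySem.Chars.lower m2.toList) h02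
        have hj2 : ¬ j < (F m2).toNat := fun hlt2 => hspec2.2 j hlt2 hpre2
        have hle2 : pvCutC cs ≤ F m2 := by rw [hr]; exact pvFold_le_f F pvHealthcareMarkers _ m2 hm2 hne2
        omega
  · left
    have hall : ∀ m ∈ pvHealthcareMarkers, F m = -1 := by
      intro m hm
      by_contra hne
      obtain ⟨j, hj⟩ := (hex m).mp hne
      exact hP ⟨j, m, hm, hj⟩
    rcases pvFold_cases F pvHealthcareMarkers (cs.length : Int) with hc | ⟨m1, hm1, he1, hne1⟩
    · rw [← hr] at hc
      exact ⟨hc, fun j hPj => hP ⟨j, hPj⟩⟩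
    · exact absurd (hall m1 hm1) hne1

theorem pvCutC_nonneg (cs : List Char) : 0 ≤ pvCutC cs := by
  rcases pvCutC_spec cs with ⟨h, _⟩ | ⟨h, _⟩
  · rw [h]; positivity
  · exact h

-- occurrence decomposition across the first newline
theorem pvP_left {l rest : List Char} (_hl : '\n' ∉ l) {j : Nat} (hj : j ≤ l.length) :
    pvP (l ++ '\n' :: rest) j ↔ pvP l j := by
  unfold pvP
  rw [pvLower_append]
  have hlenl : (PySem.Chars.lower l).length = l.length := by simp [PySem.Chars.lower]
  have hdrop : (PySem.Chars.lower l ++ '\n' :: PySem.Chars.lower rest).drop j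
      = (PySem.Chars.lower l).drop j ++ '\n' :: PySem.Chars.lower rest :=
    List.drop_append_of_le_length (by omega)
  rw [hdrop]
  constructor
  · rintro ⟨m, hm, hpre⟩
    refine ⟨m, hm, ?_⟩
    by_cases hlen2 : (pvLowM m).length ≤ ((PySem.Chars.lower l).drop j).length
    · exact List.prefix_of_prefix_length_le hpre (List.prefix_append _ _) hlen2
    · exfalso
      set k := ((PySem.Chars.lower l).drop j).length with hk
      have hklt : k < (pvLowM m).length := by omega
      have hget := hpre.getElem (i := k) hklt
      rw [List.getElem_append_right (by omega : ((PySem.Chars.lower l).drop j).length ≤ k)] at hget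
      have hkk : k - ((PySem.Chars.lower l).drop j).length = 0 := by omega
      simp only [hkk, List.getElem_cons_zero] at hget
      exact (pvMarkers_facts m hm).2 (hget ▸ List.getElem_mem hklt)
  · rintro ⟨m, hm, hpre⟩
    exact ⟨m, hm, hpre.trans (List.prefix_append _ _)⟩

theorem pvP_right {l rest : List Char} {j : Nat} (hj : l.length + 1 ≤ j) :
    pvP (l ++ '\n' :: rest) j ↔ pvP rest (j - l.length - 1) := by
  unfold pvP
  rw [pvLower_append]
  have hlenl : (PySem.Chars.lower l).length = l.length := by simp [PySem.Chars.lower]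
  have hdrop : (PySem.Chars.lower l ++ '\n' :: PySem.Chars.lower rest).drop j
      = (PySem.Chars.lower rest).drop (j - l.length - 1) := by
    rw [List.drop_append]
    rw [List.drop_eq_nil_of_le (by omega), List.nil_append]
    have hj1 : j - (PySem.Chars.lower l).length = (j - l.length - 1) + 1 := by omega
    rw [hj1, List.drop_succ_cons]
  rw [hdrop]

-- a marker inside l ⇒ the cut lands strictly inside l
theorem pvCut_inline {l rest : List Char} (hl : '\n' ∉ l) (hm : pvHasMarker l = true) :
    pvCutC (l ++ '\n' :: rest) < (l.length : Int) := by
  obtain ⟨j, m, hm, hpre⟩ := (pvHasMarker_iff l).mp hm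
  have hlenl : (PySem.Chars.lower l).length = l.length := by simp [PySem.Chars.lower]
  have hjlt : j < l.length := by
    by_contra hge
    rw [List.drop_eq_nil_of_le (by omega)] at hpre
    exact (pvMarkers_facts m hm).1 (List.prefix_nil.mp hpre)
  have hPj : pvP (l ++ '\n' :: rest) j := (pvP_left hl (by omega)).mpr ⟨m, hm, hpre⟩
  rcases pvCutC_spec (l ++ '\n' :: rest) with ⟨_, hnone⟩ | ⟨h0, _, _, hmin⟩
  · exact absurd hPj (hnone j)
  · have : ¬ j < (pvCutC (l ++ '\n' :: rest)).toNat := fun hlt => hmin j hlt hPj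
    omega

theorem pvCut_inline_nosplit {cs : List Char} (hm : pvHasMarker cs = true) :
    pvCutC cs < (cs.length : Int) := by
  obtain ⟨j, m, hm, hpre⟩ := (pvHasMarker_iff cs).mp hm
  have hlenl : (PySem.Chars.lower cs).length = cs.length := by simp [PySem.Chars.lower]
  have hjlt : j < cs.length := by
    by_contra hge
    rw [List.drop_eq_nil_of_le (by omega)] at hpre
    exact (pvMarkers_facts m hm).1 (List.prefix_nil.mp hpre)
  have hPj : pvP cs j := ⟨m, hm, hpre⟩
  rcases pvCutC_spec cs with ⟨_, hnone⟩ | ⟨h0, _, _, hmin⟩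
  · exact absurd hPj (hnone j)
  · have : ¬ j < (pvCutC cs).toNat := fun hlt => hmin j hlt hPj
    omega

theorem pvCut_nosplit_nomarker {cs : List Char} (hm : pvHasMarker cs = false) :
    pvCutC cs = (cs.length : Int) := by
  rcases pvCutC_spec cs with ⟨h, _⟩ | ⟨_, _, hPr, _⟩
  · exact h
  · exfalso
    have : pvHasMarker cs = true := (pvHasMarker_iff cs).mpr ⟨_, hPr⟩
    rw [hm] at this
    exact Bool.false_ne_true this

-- no marker in l ⇒ the cut passes the first line
theorem pvCut_step {l rest : List Char} (hl : '\n' ∉ l) (hm : pvHasMarker l = false) :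
    pvCutC (l ++ '\n' :: rest) = (l.length : Int) + 1 + pvCutC rest := by
  have hnoP : ∀ j ≤ l.length, ¬ pvP (l ++ '\n' :: rest) j := by
    intro j hj hPj
    have : pvHasMarker l = true := (pvHasMarker_iff l).mpr ⟨j, (pvP_left hl hj).mp hPj⟩
    rw [hm] at this
    exact Bool.false_ne_true this
  have hlencs : (l ++ '\n' :: rest).length = l.length + 1 + rest.length := by simp; omega
  rcases pvCutC_spec rest with ⟨hr, hnone⟩ | ⟨h0, hlt, hPr, hmin⟩
  · -- no marker in rest either: both cuts are the respective lengths
    have hnoPcs : ∀ j, ¬ pvP (l ++ '\n' :: rest) j := by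
      intro j hPj
      by_cases hj : j ≤ l.length
      · exact hnoP j hj hPj
      · exact hnone (j - l.length - 1) ((pvP_right (by omega)).mp hPj)
    rcases pvCutC_spec (l ++ '\n' :: rest) with ⟨hc, _⟩ | ⟨_, _, hPc, _⟩
    · rw [hc, hr, hlencs]; push_cast; ring
    · exact absurd hPc (hnoPcs _)
  · -- marker in rest: cut of cs is l.length + 1 + cut of rest
    set r' := pvCutC rest with hr'
    have hPv : pvP (l ++ '\n' :: rest) (l.length + 1 + r'.toNat) := by
      rw [pvP_right (by omega)]
      have : l.length + 1 + r'.toNat - l.length - 1 = r'.toNat := by omega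
      rw [this]
      exact hPr
    have hminv : ∀ j < l.length + 1 + r'.toNat, ¬ pvP (l ++ '\n' :: rest) j := by
      intro j hj hPj
      by_cases hjl : j ≤ l.length
      · exact hnoP j hjl hPj
      · exact hmin (j - l.length - 1) (by omega) ((pvP_right (by omega)).mp hPj)
    rcases pvCutC_spec (l ++ '\n' :: rest) with ⟨_, hnone⟩ | ⟨h0c, _, hPc, hminc⟩
    · exact absurd hPv (hnone _)
    · have h1 : ¬ (pvCutC (l ++ '\n' :: rest)).toNat < l.length + 1 + r'.toNat :=
        fun hlt2 => hminv _ hlt2 hPc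
      have h2 : ¬ l.length + 1 + r'.toNat < (pvCutC (l ++ '\n' :: rest)).toNat :=
        fun hlt2 => hminc _ hlt2 hPv
      omega

-- B's loop only depends on cut - pos
theorem pvLoopB_shift (lines : List String) : ∀ (cut pos : Int),
    pvLoopB cut pos lines = pvLoopB (cut - pos) 0 lines := by
  induction lines with
  | nil => intro cut pos; simp [pvLoopB]
  | cons line rest ih =>
    intro cut pos
    simp only [pvLoopB]
    by_cases hc : pos + PySem.Str.len line > cut
    · rw [if_pos hc, if_pos (show (0:Int) + PySem.Str.len line > cut - pos from by omega)]
    · rw [if_neg hc, if_neg (show ¬((0:Int) + PySem.Str.len line > cut - pos) from by omega)]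
      rw [ih cut (pos + PySem.Str.len line + 1), ih (cut - pos) (0 + PySem.Str.len line + 1)]
      have harith : cut - (pos + PySem.Str.len line + 1) = cut - pos - (0 + PySem.Str.len line + 1) := by
        omega
      rw [harith]

-- bridges to the String-level predicates
theorem pvIsHealthcareA_ofList (l : List Char) : pvIsHealthcareA (String.ofList l) = pvHasMarker l := by
  unfold pvIsHealthcareA pvHasMarker pvLowM
  congr 1
  funext m
  show PySem.Chars.isIn (PySem.Str.lower m).toList (PySem.Str.lower (String.ofList l)).toList = _
  simp

theorem pvLen_ofList (l : List Char) : PySem.Str.len (String.ofList l) = (l.length : Int) := by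
  simp [PySem.Str.len]

-- first-newline decomposition
theorem pvSplit_first_nl {cs : List Char} (h : '\n' ∈ cs) :
    ∃ l rest, cs = l ++ '\n' :: rest ∧ '\n' ∉ l := by
  induction cs with
  | nil => simp at h
  | cons c rest ih =>
    by_cases hc : c = '\n'
    · exact ⟨[], rest, by simp [hc], by simp⟩
    · have hmem : '\n' ∈ rest := by
        rcases List.mem_cons.mp h with heq | hmem
        · exact absurd heq.symm hc
        · exact hmem
      obtain ⟨l, r, heq, hnot⟩ := ih hmem
      exact ⟨c :: l, r, by simp [heq], by
        intro hh
        rcases List.mem_cons.mp hh with heq2 | hmem2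
        · exact hc heq2.symm
        · exact hnot hmem2⟩

-- MAIN, single-line case: no newline in cs
theorem pvMain_nosplit (cs : List Char) (h : '\n' ∉ cs) :
    pvLoopB (pvCutC cs) 0 ((pvSplitNL [] cs).map String.ofList)
      = (((pvSplitNL [] cs).map String.ofList).takeWhile (fun s => !pvIsHealthcareA s)).filter pvKeepB := by
  rw [pvSplitNL_no_nl h []]
  simp only [List.nil_append, List.map_cons, List.map_nil]
  by_cases hm : pvHasMarker cs
  · have hcut := pvCut_inline_nosplit hm
    have hA : pvIsHealthcareA (String.ofList cs) = true := by rw [pvIsHealthcareA_ofList]; exact hm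
    simp only [pvLoopB, pvLen_ofList]
    rw [if_pos (show (0:Int) + (cs.length : Int) > pvCutC cs from by omega)]
    rw [List.takeWhile_cons, hA]
    simp
  · have hm' : pvHasMarker cs = false := by simpa using hm
    have hcut := pvCut_nosplit_nomarker hm'
    have hA : pvIsHealthcareA (String.ofList cs) = false := by rw [pvIsHealthcareA_ofList]; exact hm'
    simp only [pvLoopB, pvLen_ofList]
    rw [if_neg (show ¬((0:Int) + (cs.length : Int) > pvCutC cs) from by omega)]
    rw [List.takeWhile_cons, hA]
    simp only [Bool.not_false, if_true, List.takeWhile_nil, List.filter_cons, List.filter_nil]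
    cases hk : pvKeepB (String.ofList cs) <;> simp_all

-- MAIN: B's offset loop computes A's takeWhile-filter
theorem pvMain (n : Nat) : ∀ cs : List Char, cs.length ≤ n →
    pvLoopB (pvCutC cs) 0 ((pvSplitNL [] cs).map String.ofList)
      = (((pvSplitNL [] cs).map String.ofList).takeWhile (fun s => !pvIsHealthcareA s)).filter pvKeepB := by
  induction n with
  | zero =>
    intro cs hlen
    have hnil : cs = [] := List.eq_nil_of_length_eq_zero (by omega)
    subst hnil
    exact pvMain_nosplit [] (by simp)
  | succ n ih =>
    intro cs hlen
    by_cases hnl : '\n' ∈ cs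
    · obtain ⟨l, rest, rfl, hnotl⟩ := pvSplit_first_nl hnl
      rw [pvSplitNL_append hnotl [] rest]
      simp only [List.nil_append, List.map_cons]
      by_cases hm : pvHasMarker l
      · have hcut := pvCut_inline (rest := rest) hnotl hm
        have hA : pvIsHealthcareA (String.ofList l) = true := by rw [pvIsHealthcareA_ofList]; exact hm
        simp only [pvLoopB, pvLen_ofList]
        rw [if_pos (show (0:Int) + (l.length : Int) > pvCutC (l ++ '\n' :: rest) from by omega)]
        rw [List.takeWhile_cons, hA]
        simp
      · have hm' : pvHasMarker l = false := by simpa using hm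
        have hcut := pvCut_step (rest := rest) hnotl hm'
        have hnn := pvCutC_nonneg rest
        have hA : pvIsHealthcareA (String.ofList l) = false := by rw [pvIsHealthcareA_ofList]; exact hm'
        simp only [pvLoopB, pvLen_ofList]
        rw [if_neg (show ¬((0:Int) + (l.length : Int) > pvCutC (l ++ '\n' :: rest)) from by omega)]
        rw [pvLoopB_shift]
        have harith : pvCutC (l ++ '\n' :: rest) - (0 + (l.length : Int) + 1) = pvCutC rest := by
          omega
        rw [harith]
        have hrest : rest.length ≤ n := by
          have : (l ++ '\n' :: rest).length = l.length + 1 + rest.length := by simp; omega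
          omega
        rw [ih rest hrest]
        rw [List.takeWhile_cons, hA]
        simp only [Bool.not_false, if_true, List.filter_cons]
        cases hk : pvKeepB (String.ofList l) <;> simp_all
    · exact pvMain_nosplit cs hnl

-- the split bridge at String level
theorem pvSplit_lines (text : String) :
    (PySem.Str.split? text "\n").getD [] = (pvSplitNL [] text.toList).map String.ofList := by
  have h1 : ("\n" : String).toList = ['\n'] := rfl
  unfold PySem.Str.split?
  rw [h1, PySem.Chars.split?]
  simp [pvSplitOn_eq]

-- the port's fold is pvCutC
theorem pvCut_port (text : String) :
    pvHealthcareMarkers.foldl (fun cut m =>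
      let p := PySem.Str.find (PySem.Str.lower text) (PySem.Str.lower m)
      if p ≠ -1 ∧ p < cut then p else cut) (PySem.Str.len text) = pvCutC text.toList := by
  unfold pvCutC
  have hfind : ∀ m : String, PySem.Str.find (PySem.Str.lower text) (PySem.Str.lower m)
      = PySem.Chars.find (PySem.Chars.lower text.toList) (PySem.Chars.lower m.toList) := by
    intro m
    show PySem.Chars.find (PySem.Str.lower text).toList (PySem.Str.lower m).toList = _
    simp
  have hlen : PySem.Str.len text = (text.toList.length : Int) := rfl
  simp only [hfind, hlen]

-- ===== VERDICT (by name: the statement is the Claim_ definition above) =====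
theorem filter_healthcare_maintenance_py_spec : Claim_equal_filter_healthcare_maintenance_py := by
  intro text _
  unfold Spec_filter_healthcare_maintenance_py filter_healthcare_maintenance_py filter_healthcare_maintenance_py_alt
  simp only []
  rw [pvLoopA_eq, List.nil_append, pvSplit_lines, pvCut_port,
    pvMain text.toList.length text.toList le_rfl]
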